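-- pv_equiv track=rewrite | github.com/fabriziosalmi/proxymate | scripts/mitmproxy/proxymate_addon.py | _detect_ai
-- ===== SOURCE A (Python) =====
-- def _detect_ai(host: str, headers: dict) -> str | None:
--     """Detect AI provider from host."""
--     providers = {
--         "api.openai.com": "OpenAI",
--         "api.anthropic.com": "Anthropic",
--         "generativelanguage.googleapis.com": "Google AI",
--         "api.mistral.ai": "Mistral",
--         "api.cohere.ai": "Cohere",
--         "api.together.xyz": "Together",
--         "api.groq.com": "Groq",
--         "api.fireworks.ai": "Fireworks",
--         "api.perplexity.ai": "Perplexity",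
--         "api.deepseek.com": "DeepSeek",
--     }
--     for domain, name in providers.items():
--         if host == domain or host.endswith("." + domain):
--             return name
--     return None
-- ===== SOURCE B (Python) =====
-- def _detect_ai(host: str, headers: dict) -> str | None:
--     """Detect AI provider from host by walking its dot-suffix chain with O(1) dict lookups."""
--     providers = {
--         "api.openai.com": "OpenAI",
--         "api.anthropic.com": "Anthropic",
--         "generativelanguage.googleapis.com": "Google AI",
--         "api.mistral.ai": "Mistral",
--         "api.cohere.ai": "Cohere",
--         "api.together.xyz": "Together",
--         "api.groq.com": "Groq",
--         "api.fireworks.ai": "Fireworks",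
--         "api.perplexity.ai": "Perplexity",
--         "api.deepseek.com": "DeepSeek",
--     }
--     s = host
--     while True:
--         name = providers.get(s)
--         if name is not None:
--             return name
--         dot = s.find(".")
--         if dot == -1:
--             return None
--         s = s[dot + 1:]
-- ===== Notes on version B (the rewrite author's own statement) =====
-- stated objective: alternative
-- what changed: Instead of scanning the 10-entry provider table and testing host==domain or host.endswith('.'+domain) for each entry, B walks the host's dot-suffix chain (cut at the first '.' repeatedly) and does one dict lookup per suffix.
import Mathlib
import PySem

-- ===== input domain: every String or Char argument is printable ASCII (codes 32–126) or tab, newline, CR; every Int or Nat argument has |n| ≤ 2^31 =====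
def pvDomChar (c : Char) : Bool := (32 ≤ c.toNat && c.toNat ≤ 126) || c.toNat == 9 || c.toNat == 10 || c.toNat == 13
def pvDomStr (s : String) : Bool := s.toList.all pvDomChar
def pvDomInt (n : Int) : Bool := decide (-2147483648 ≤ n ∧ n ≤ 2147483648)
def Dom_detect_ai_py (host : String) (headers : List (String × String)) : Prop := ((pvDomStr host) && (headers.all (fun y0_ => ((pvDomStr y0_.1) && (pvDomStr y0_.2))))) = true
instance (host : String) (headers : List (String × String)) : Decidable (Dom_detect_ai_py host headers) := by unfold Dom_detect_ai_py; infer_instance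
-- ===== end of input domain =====

-- B replaces A's linear scan of the provider table (endswith per entry) by walking the host's
-- dot-suffix chain with one dict lookup per suffix (objective: alternative, not measured faster).

-- ===== PORT A =====
-- the dict literal, in insertion order (type convention: dict -> association list)
def pvProviders : List (String × String) :=
  [("api.openai.com", "OpenAI"),
   ("api.anthropic.com", "Anthropic"),
   ("generativelanguage.googleapis.com", "Google AI"),
   ("api.mistral.ai", "Mistral"),
   ("api.cohere.ai", "Cohere"),
   ("api.together.xyz", "Together"),
   ("api.groq.com", "Groq"),
   ("api.fireworks.ai", "Fireworks"),
   ("api.perplexity.ai", "Perplexity"),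
   ("api.deepseek.com", "DeepSeek")]

-- A's loop `for domain, name in providers.items(): if host == domain or host.endswith("." + domain): return name`
def pvFindA (host : String) : List (String × String) → Option String
  | [] => none
  | (domain, name) :: rest =>
    if host == domain || PySem.Str.endswith host ("." ++ domain) then some name
    else pvFindA host rest

def detect_ai_py (host : String) (headers : List (String × String)) : Option String :=
  pvFindA host pvProviders

-- ===== PORT B =====
-- `providers.get(s)`: first-match association lookup (exact for this literal dict); keys on the
-- List Char side, the exact representation of the string s being walked
def pvGet (s : List Char) : List (String × String) → Option String
  | [] => none
  | (domain, name) :: rest => if s = domain.toList then some name else pvGet s rest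

-- B's `while True:` loop: look s up, else cut at the first '.', via s.find(".") and s[dot+1:]
def pvGoB (s : List Char) : Option String :=
  match pvGet s pvProviders with
  | some name => some name
  | none =>
    let dot := PySem.Chars.find s ['.']
    if h : dot = -1 then none
    else
      pvGoB (s.drop (dot.toNat + 1))
termination_by s.length
decreasing_by
  have h0 : (0:Int) ≤ PySem.Chars.find s ['.'] := by
    have := PySem.Chars.neg_one_le_find (s := s) (sub := ['.'])
    omega
  have hpre := (PySem.Chars.find_spec (s := s) (sub := ['.']) h0).1
  have hlt : (PySem.Chars.find s ['.']).toNat < s.length := by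
    by_contra hge
    have : s.drop (PySem.Chars.find s ['.']).toNat = [] := by
      refine List.drop_eq_nil_of_le ?_; omega
    rw [this] at hpre
    exact absurd (List.IsPrefix.length_le hpre) (by simp)
  simp only [List.length_drop]
  omega

def detect_ai_py_alt (host : String) (headers : List (String × String)) : Option String :=
  pvGoB host.toList

-- ===== PRECONDITION & SPEC =====
def Spec_detect_ai_py (host : String) (headers : List (String × String)) (out : Option String) : Prop := out = detect_ai_py_alt host headers
instance (host : String) (headers : List (String × String)) (out : Option String) : Decidable (Spec_detect_ai_py host headers out) := by unfold Spec_detect_ai_py; infer_instance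

-- ===== CLAIM (what is proved, stated in full; the proofs are below) =====
def Claim_equal_detect_ai_py : Prop := ∀ (host : String) (headers : List (String × String)), Dom_detect_ai_py host headers → Spec_detect_ai_py host headers (detect_ai_py host headers)

-- ===== LEMMAS AND PROOFS =====

-- "host matches domain" as a Bool on the List Char side
def pvMatchb (cs : List Char) (d : String) : Bool :=
  decide (cs = d.toList) || decide (('.' :: d.toList) <:+ cs)

-- A's scan, rephrased with pvMatchb
def pvScan (cs : List Char) : List (String × String) → Option String
  | [] => none
  | (d, n) :: rest => if pvMatchb cs d then some n else pvScan cs rest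

lemma pvFindA_eq_scan (host : String) (T : List (String × String)) :
    pvFindA host T = pvScan host.toList T := by
  induction T with
  | nil => rfl
  | cons p rest ih =>
    obtain ⟨d, n⟩ := p
    have hc : (host == d || PySem.Str.endswith host ("." ++ d)) = pvMatchb host.toList d := by
      rw [Bool.eq_iff_iff]
      simp only [pvMatchb, Bool.or_eq_true, decide_eq_true_eq,
        beq_iff_eq, PySem.Str.endswith_eq, PySem.Chars.endswith_iff, String.toList_append]
      constructor
      · rintro (h | h)
        · left; rw [h]
        · right; simpa using h
      · rintro (h | h)
        · left; exact String.ext (by simpa using h)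
        · right; simpa using h
    simp only [pvFindA, pvScan, hc, ih]

lemma pvScan_congr (cs cs' : List Char) (T : List (String × String))
    (h : ∀ p ∈ T, pvMatchb cs p.1 = pvMatchb cs' p.1) :
    pvScan cs T = pvScan cs' T := by
  induction T with
  | nil => rfl
  | cons p rest ih =>
    obtain ⟨d, n⟩ := p
    have hd := h (d, n) (by simp)
    simp only [pvScan, hd]
    split
    · rfl
    · exact ih (fun q hq => h q (by simp [hq]))

lemma pvScan_none (cs : List Char) (T : List (String × String))
    (h : ∀ p ∈ T, pvMatchb cs p.1 = false) :
    pvScan cs T = none := by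
  induction T with
  | nil => rfl
  | cons p rest ih =>
    obtain ⟨d, n⟩ := p
    simp only [pvScan, h (d, n) (by simp)]
    exact ih (fun q hq => h q (by simp [hq]))

lemma pvGet_none (cs : List Char) (T : List (String × String))
    (h : pvGet cs T = none) : ∀ p ∈ T, cs ≠ p.1.toList := by
  induction T with
  | nil => intro p hp; simp at hp
  | cons p rest ih =>
    obtain ⟨d, n⟩ := p
    intro q hq
    simp only [pvGet] at h
    split at h
    · exact absurd h (by simp)
    · rcases List.mem_cons.mp hq with h' | h'
      · subst h'; assumption
      · exact ih h q h'

lemma pvGet_some_key (cs : List Char) (T : List (String × String)) (n : String)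
    (h : pvGet cs T = some n) : ∃ p ∈ T, cs = p.1.toList := by
  induction T with
  | nil => simp [pvGet] at h
  | cons p rest ih =>
    obtain ⟨d, m⟩ := p
    simp only [pvGet] at h
    split at h
    · exact ⟨(d, m), by simp, by assumption⟩
    · obtain ⟨q, hq, hcs⟩ := ih h
      exact ⟨q, by simp [hq], hcs⟩

-- no provider domain is, with a preceding dot, a suffix of another provider domain
lemma pvProviders_nosuffix :
    ∀ p ∈ pvProviders, ∀ q ∈ pvProviders, ¬ ('.' :: q.1.toList <:+ p.1.toList) := by decide

lemma pvScan_of_get (cs : List Char) (T : List (String × String)) (n : String)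
    (hdot : ∀ p ∈ T, ∀ q ∈ T, ¬ ('.' :: q.1.toList <:+ p.1.toList))
    (h : pvGet cs T = some n) : pvScan cs T = some n := by
  induction T with
  | nil => simp [pvGet] at h
  | cons p rest ih =>
    obtain ⟨d, m⟩ := p
    simp only [pvGet] at h
    by_cases he : cs = d.toList
    · rw [if_pos he] at h
      simp only [pvScan, pvMatchb, he]
      simpa using h
    · rw [if_neg he] at h
      obtain ⟨q, hq, hcs⟩ := pvGet_some_key cs rest n h
      have hns : ¬ ('.' :: d.toList <:+ cs) := by
        rw [hcs]
        exact hdot q (by simp [hq]) (d, m) (by simp)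
      have hm : pvMatchb cs d = false := by
        simp [pvMatchb, he, hns]
      simp only [pvScan, hm, Bool.false_eq_true, if_false]
      exact ih (fun a ha b hb => hdot a (by simp [ha]) b (by simp [hb])) h

lemma pvGoB_eq_scan : ∀ (N : Nat) (cs : List Char), cs.length < N →
    pvGoB cs = pvScan cs pvProviders := by
  intro N
  induction N with
  | zero => intro cs hcs; omega
  | succ N ih =>
    intro cs hcs
    rw [pvGoB]
    cases hget : pvGet cs pvProviders with
    | some n =>
      simp only []
      exact (pvScan_of_get cs pvProviders n pvProviders_nosuffix hget).symm
    | none =>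
      have hkeys := pvGet_none cs pvProviders hget
      simp only []
      by_cases hdot : PySem.Chars.find cs ['.'] = -1
      · rw [dif_pos hdot]
        refine (pvScan_none cs pvProviders ?_).symm
        intro p hp
        have hninf : ¬ (['.'] <:+: cs) := (PySem.Chars.find_eq_neg_one_iff cs ['.']).mp hdot
        have h1 : cs ≠ p.1.toList := hkeys p hp
        have h2 : ¬ ('.' :: p.1.toList <:+ cs) := fun hs =>
          hninf (List.IsInfix.trans ⟨[], p.1.toList, rfl⟩ hs.isInfix)
        simp [pvMatchb, h1, h2]
      · rw [dif_neg hdot]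
        have h0 : (0:Int) ≤ PySem.Chars.find cs ['.'] := by
          have := PySem.Chars.neg_one_le_find (s := cs) (sub := ['.'])
          omega
        obtain ⟨hpre, hmin⟩ := PySem.Chars.find_spec (s := cs) (sub := ['.']) h0
        set k := (PySem.Chars.find cs ['.']).toNat with hk
        have hdk : cs.drop k = '.' :: cs.drop (k + 1) := by
          obtain ⟨t, ht⟩ := hpre
          have htail : (cs.drop k).tail = cs.drop (k + 1) := List.tail_drop
          rw [← ht] at htail
          simp only [List.singleton_append, List.tail_cons] at htail
          rw [← ht, htail]
          simp
        have hklt : k < cs.length := by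
          by_contra hge
          have : cs.drop k = [] := List.drop_eq_nil_of_le (by omega)
          rw [this] at hdk; exact absurd hdk (by simp)
        have hsuf : '.' :: cs.drop (k + 1) <:+ cs := hdk ▸ List.drop_suffix k cs
        rw [ih (cs.drop (k + 1)) (by simp only [List.length_drop]; omega)]
        refine pvScan_congr _ _ _ ?_
        intro p hp
        have hne : cs ≠ p.1.toList := hkeys p hp
        rw [Bool.eq_iff_iff]
        simp only [pvMatchb, Bool.or_eq_true, decide_eq_true_eq]
        constructor
        · -- any match of the shortened suffix is a match of cs
          rintro (h | h)
          · right; rw [← h]; exact hsuf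
          · right; exact h.trans (List.drop_suffix (k + 1) cs)
        · -- a match of cs survives cutting at the FIRST dot
          rintro (h | h)
          · exact absurd h hne
          · obtain ⟨pfx, hpfx⟩ := h
            have hkle : k ≤ pfx.length := by
              by_contra hlt
              refine hmin pfx.length (by omega) ?_
              rw [← hpfx, List.drop_left]
              exact ⟨p.1.toList, rfl⟩
            have hlen : p.1.toList.length + 1 ≤ (cs.drop (k + 1)).length + 1 := by
              have := congrArg List.length hpfx
              simp only [List.length_append, List.length_cons] at this
              simp only [List.length_drop]
              omega
            have hsub : '.' :: p.1.toList <:+ '.' :: cs.drop (k + 1) :=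
              List.suffix_of_suffix_length_le ⟨pfx, hpfx⟩ hsuf (by simpa using hlen)
            rcases List.suffix_cons_iff.mp hsub with h' | h'
            · left
              have := h'
              simp only [List.cons.injEq, true_and] at this
              exact this.symm
            · right; exact h'

-- ===== VERDICT (by name: the statement is the Claim_ definition above) =====
theorem detect_ai_py_spec : Claim_equal_detect_ai_py := by
  intro host headers _
  unfold Spec_detect_ai_py detect_ai_py detect_ai_py_alt
  rw [pvFindA_eq_scan, (pvGoB_eq_scan (host.toList.length + 1) host.toList (by omega))]
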